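-- pv_equiv track=rewrite | github.com/haolunc/ARC-RL | reference_solutions/solutions/b2862040.py | transform
-- ===== SOURCE A (Python) =====
-- def transform(grid):
--
--     h = len(grid)
--     w = len(grid[0])
--     visited = [[False] * w for _ in range(h)]
--
--     neigh = [(1, 0), (-1, 0), (0, 1), (0, -1)]
--
--     for i in range(h):
--         for j in range(w):
--             if grid[i][j] != 1 or visited[i][j]:
--                 continue
--
--             stack = [(i, j)]
--             visited[i][j] = True
--             cells = []
--             edge_cnt = 0
--
--             while stack:
--                 x, y = stack.pop()
--                 cells.append((x, y))
--
--                 for dx, dy in ((0, 1), (1, 0)):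
--                     nx, ny = x + dx, y + dy
--                     if 0 <= nx < h and 0 <= ny < w and grid[nx][ny] == 1:
--                         edge_cnt += 1
--
--                 for dx, dy in neigh:
--                     nx, ny = x + dx, y + dy
--                     if 0 <= nx < h and 0 <= ny < w and grid[nx][ny] == 1 and not visited[nx][ny]:
--                         visited[nx][ny] = True
--                         stack.append((nx, ny))
--
--             if edge_cnt >= len(cells):
--                 for x, y in cells:
--                     grid[x][y] = 8
--
--     return grid
-- ===== SOURCE B (Python) =====
-- def transform(grid):
--     h = len(grid)
--     w = len(grid[0])
--     ones = {(i, j) for i in range(h) for j in range(w) if grid[i][j] == 1}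
--
--     def component(seed):
--         comp = {seed}
--         for _ in range(h * w):
--             grown = comp | {(x + dx, y + dy)
--                             for (x, y) in comp
--                             for (dx, dy) in ((1, 0), (-1, 0), (0, 1), (0, -1))
--                             if (x + dx, y + dy) in ones}
--             if grown == comp:
--                 break
--             comp = grown
--         return comp
--
--     remaining = set(ones)
--     for i in range(h):
--         for j in range(w):
--             if (i, j) not in remaining:
--                 continue
--             comp = component((i, j))
--             edges = sum(1 for (x, y) in comp
--                         for (dx, dy) in ((0, 1), (1, 0))
--                         if (x + dx, y + dy) in ones)
--             if edges >= len(comp):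
--                 for (x, y) in comp:
--                     grid[x][y] = 8
--             remaining -= comp
--     return grid
-- ===== Notes on version B (the rewrite author's own statement) =====
-- stated objective: alternative
-- what changed: Replaces the stack-based DFS flood fill with an interleaved visited matrix and in-flood edge counting by a precomputed set of 1-cells, per-seed component computation via monotone neighbourhood saturation to a fixed point, and a comprehension-style edge count over the finished component; a remaining-set replaces the visited matrix.
-- outside the precondition, e.g. on transform([]): A raises IndexError, B raises IndexError; on transform([[1, 1], [1]]): A raises IndexError, B raises IndexError
import Mathlib
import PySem

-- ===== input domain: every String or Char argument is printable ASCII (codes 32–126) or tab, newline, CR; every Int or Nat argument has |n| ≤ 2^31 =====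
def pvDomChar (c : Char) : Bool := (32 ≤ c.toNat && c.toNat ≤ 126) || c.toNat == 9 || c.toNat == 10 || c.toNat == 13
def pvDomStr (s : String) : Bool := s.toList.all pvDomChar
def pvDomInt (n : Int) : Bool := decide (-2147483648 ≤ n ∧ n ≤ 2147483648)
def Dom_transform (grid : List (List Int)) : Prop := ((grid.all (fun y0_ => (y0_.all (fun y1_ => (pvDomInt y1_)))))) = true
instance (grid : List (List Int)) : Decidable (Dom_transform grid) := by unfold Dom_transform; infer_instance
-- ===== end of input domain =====

-- B replaces A's stack-DFS flood fill (with in-flood edge counting and a visited matrix) by a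
-- precomputed set of 1-cells, per-seed component computation by neighbourhood saturation to a fixed
-- point, a comprehension-style edge count, and a remaining-set; both mutate the input grid in place
-- in Python (same cells set to 8), and the equivalence proved here is about the returned grid.


-- ===== PORT A =====
-- 2-d read/write on a list-of-lists grid; exact for the in-range, non-negative indices the
-- Python guards (0 <= nx < h and 0 <= ny < w, loop indices) ensure wherever these are called.
def gget (g : List (List Int)) (x y : Int) : Int := (g.getD x.toNat []).getD y.toNat 0

def gset (g : List (List Int)) (x y : Int) (v : Int) : List (List Int) :=
  g.set x.toNat ((g.getD x.toNat []).set y.toNat v)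

def vget (v : List (List Bool)) (x y : Int) : Bool := (v.getD x.toNat []).getD y.toNat false

def vset (v : List (List Bool)) (x y : Int) : List (List Bool) :=
  v.set x.toNat ((v.getD x.toNat []).set y.toNat true)

-- the inner 'for dx, dy in ((0, 1), (1, 0)): … edge_cnt += 1' of A
def edgeStep (g : List (List Int)) (hI wI : Int) (x y : Int) : Nat :=
  (if 0 ≤ x ∧ x < hI ∧ 0 ≤ y + 1 ∧ y + 1 < wI ∧ gget g x (y + 1) = 1 then 1 else 0) +
  (if 0 ≤ x + 1 ∧ x + 1 < hI ∧ 0 ≤ y ∧ y < wI ∧ gget g (x + 1) y = 1 then 1 else 0)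

-- A's neighbour list 'neigh'
def neighA : List (Int × Int) := [(1, 0), (-1, 0), (0, 1), (0, -1)]

-- one step of the inner 'for dx, dy in neigh' push loop of A
def pushStep (g : List (List Int)) (hI wI : Int) (x y : Int)
    (st : List (List Bool) × List (Int × Int)) (d : Int × Int) :
    List (List Bool) × List (Int × Int) :=
  let nx := x + d.1
  let ny := y + d.2
  if 0 ≤ nx ∧ nx < hI ∧ 0 ≤ ny ∧ ny < wI ∧ gget g nx ny = 1 ∧ vget st.1 nx ny = false then
    (vset st.1 nx ny, (nx, ny) :: st.2)
  else st

-- A's 'while stack' loop; the stack's head is its Python top (append/pop at the same end);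
-- fuel only makes the recursion structural, 2*h*w+1 is proved sufficient below
def dfsLoop (g : List (List Int)) (hI wI : Int) :
    Nat → List (List Bool) → List (Int × Int) → List (Int × Int) → Nat →
    List (List Bool) × List (Int × Int) × Nat
  | 0, vis, _, cells, e => (vis, cells, e)
  | _ + 1, vis, [], cells, e => (vis, cells, e)
  | f + 1, vis, (x, y) :: st, cells, e =>
    let e' := e + edgeStep g hI wI x y
    let vs := neighA.foldl (pushStep g hI wI x y) (vis, st)
    dfsLoop g hI wI f vs.1 vs.2 (cells ++ [(x, y)]) e'

-- body of A's double loop over (i, j)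
def procCell (h w : Nat) (st : List (List Int) × List (List Bool)) (i j : Int) :
    List (List Int) × List (List Bool) :=
  if gget st.1 i j ≠ 1 ∨ vget st.2 i j = true then st
  else
    let out := dfsLoop st.1 (h : Int) (w : Int) (2 * h * w + 1) (vset st.2 i j) [(i, j)] [] 0
    if out.2.1.length ≤ out.2.2 then
      (out.2.1.foldl (fun g' c => gset g' c.1 c.2 8) st.1, out.1)
    else (st.1, out.1)

def transform (grid : List (List Int)) : List (List Int) :=
  if grid.isEmpty then [] else   -- Python raises IndexError on []; excluded by Pre_transform
    let h := grid.length
    let w := (grid.headD []).length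
    (((List.range h).foldl (fun st (i : Nat) =>
        (List.range w).foldl (fun st (j : Nat) => procCell h w st (i : Int) (j : Int)) st)
      (grid, List.replicate h (List.replicate w false)))).1

-- ===== PORT B =====
-- B's neighbour tuple ((1,0),(-1,0),(0,1),(0,-1)) applied to a point
def nbrs (p : Int × Int) : List (Int × Int) :=
  [(p.1 + 1, p.2), (p.1 - 1, p.2), (p.1, p.2 + 1), (p.1, p.2 - 1)]

-- B's 'ones' set comprehension
def onesOf (grid : List (List Int)) (h w : Nat) : List (Int × Int) :=
  PySem.Set.ofList ((List.range h).flatMap (fun (i : Nat) =>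
    (List.range w).filterMap (fun (j : Nat) =>
      if gget grid (i : Int) (j : Int) = 1 then some ((i : Int), (j : Int)) else none)))

-- 'comp | {(x+dx, y+dy) for (x,y) in comp for (dx,dy) in … if … in ones}'
def growOnce (ones comp : List (Int × Int)) : List (Int × Int) :=
  PySem.Set.union comp
    (PySem.Set.ofList (comp.flatMap (fun p => (nbrs p).filter (fun q => decide (q ∈ ones)))))

-- B's 'for _ in range(h*w): … if grown == comp: break' saturation loop
def satLoop (ones : List (Int × Int)) : Nat → List (Int × Int) → List (Int × Int)
  | 0, comp => comp
  | f + 1, comp =>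
    let grown := growOnce ones comp
    if PySem.Set.equal grown comp then comp else satLoop ones f grown

-- B's 'edges = sum(1 for (x,y) in comp for (dx,dy) in ((0,1),(1,0)) if … in ones)'
def edgesOf (ones comp : List (Int × Int)) : Nat :=
  comp.foldl (fun a p =>
    a + ((if (p.1, p.2 + 1) ∈ ones then 1 else 0) + (if (p.1 + 1, p.2) ∈ ones then 1 else 0))) 0

-- body of B's double loop over (i, j)
def procCellB (ones : List (Int × Int)) (h w : Nat)
    (st : List (List Int) × List (Int × Int)) (i j : Int) :
    List (List Int) × List (Int × Int) :=
  if (i, j) ∈ st.2 then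
    let comp := satLoop ones (h * w) (PySem.Set.ofList [(i, j)])
    let g' := if comp.length ≤ edgesOf ones comp then
        comp.foldl (fun g' c => gset g' c.1 c.2 8) st.1
      else st.1
    (g', PySem.Set.diff st.2 comp)
  else st

def transform_alt (grid : List (List Int)) : List (List Int) :=
  if grid.isEmpty then [] else   -- Python B raises IndexError on []; excluded by Pre_transform
    let h := grid.length
    let w := (grid.headD []).length
    let ones := onesOf grid h w
    (((List.range h).foldl (fun st (i : Nat) =>
        (List.range w).foldl (fun st (j : Nat) => procCellB ones h w st (i : Int) (j : Int)) st)
      (grid, PySem.Set.ofList ones))).1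

-- ===== PRECONDITION & SPEC =====
-- Pre_ excludes exactly the inputs where the Pythons raise IndexError: the empty grid
-- (grid[0]) and grids with a row shorter than the first row (grid[i][j], j < w).
def Pre_transform (grid : List (List Int)) : Prop :=
  grid ≠ [] ∧ ∀ r ∈ grid, (grid.headD []).length ≤ r.length
instance (grid : List (List Int)) : Decidable (Pre_transform grid) := by
  unfold Pre_transform; infer_instance

def pvWitness_transform : List (List Int) := [[1, 1], [1, 1]]

def Spec_transform (grid : List (List Int)) (out : List (List Int)) : Prop := out = transform_alt grid
instance (grid : List (List Int)) (out : List (List Int)) : Decidable (Spec_transform grid out) := by unfold Spec_transform; infer_instance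

-- ===== CLAIM (what is proved, stated in full; the proofs are below) =====
def Claim_equal_transform : Prop := ∀ (grid : List (List Int)), Dom_transform grid → Pre_transform grid → Spec_transform grid (transform grid)

-- ===== LEMMAS AND PROOFS =====

-- in-range coordinates, grid/visited shape predicates, the per-cell right/down degree,
-- closedness of a predicate under 1-cell adjacency, and recoloring (all proof-only helpers)
def InR (h w : Nat) (p : Int × Int) : Prop :=
  0 ≤ p.1 ∧ p.1 < (h : Int) ∧ 0 ≤ p.2 ∧ p.2 < (w : Int)

def GOOD (h w : Nat) (g : List (List Int)) : Prop :=
  g.length = h ∧ ∀ k : Nat, k < h → w ≤ (g.getD k []).length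

def Rect (h w : Nat) (v : List (List Bool)) : Prop :=
  v.length = h ∧ ∀ r ∈ v, r.length = w

def degC (ones : List (Int × Int)) (p : Int × Int) : Nat :=
  (if (p.1, p.2 + 1) ∈ ones then 1 else 0) + (if (p.1 + 1, p.2) ∈ ones then 1 else 0)

def ClosedP (ones : List (Int × Int)) (P : Int × Int → Prop) : Prop :=
  ∀ p, P p → ∀ q ∈ nbrs p, q ∈ ones → P q

def paint (g : List (List Int)) (L : List (Int × Int)) : List (List Int) :=
  L.foldl (fun g' c => gset g' c.1 c.2 8) g

-- ---------- generic 2-d getD/set lemmas ----------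

theorem getD_set_self {α : Type} (l : List α) (i : Nat) (a d : α) (h : i < l.length) :
    (l.set i a).getD i d = a := by
  rw [List.getD_eq_getElem?_getD, List.getElem?_set_self h]; rfl

theorem getD_set_ne {α : Type} (l : List α) (i j : Nat) (a d : α) (h : i ≠ j) :
    (l.set i a).getD j d = l.getD j d := by
  rw [List.getD_eq_getElem?_getD, List.getD_eq_getElem?_getD, List.getElem?_set_ne h]

theorem getD2_set2 {α : Type} (l : List (List α)) (i j : Nat) (a d : α) (x y : Nat)
    (hi : i < l.length) (hj : j < (l.getD i []).length) :
    ((l.set i ((l.getD i []).set j a)).getD x []).getD y d =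
      if x = i ∧ y = j then a else (l.getD x []).getD y d := by
  by_cases hx : x = i
  · subst hx
    rw [getD_set_self _ _ _ _ hi]
    by_cases hy : y = j
    · subst hy; rw [getD_set_self _ _ _ _ hj]; simp
    · rw [getD_set_ne (l.getD x []) j y a d (fun hh => hy hh.symm)]
      simp [hy]
  · rw [getD_set_ne _ _ _ _ _ (fun hh => hx hh.symm)]
    simp [hx]

theorem getD2_set2_rowlen {α : Type} (l : List (List α)) (i j : Nat) (a : α) (k : Nat) :
    ((l.set i ((l.getD i []).set j a)).getD k []).length = (l.getD k []).length := by
  by_cases hk : k = i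
  · subst hk
    by_cases hkl : k < l.length
    · rw [getD_set_self _ _ _ _ hkl]; simp
    · have hset : l.set k ((l.getD k []).set j a) = l := by
        apply List.ext_getElem
        · simp
        · intro n h1 h2
          have hn : n < l.length := by simpa using h1
          have : k ≠ n := by omega
          simp [List.getElem_set_ne this]
      rw [hset]
  · rw [getD_set_ne _ _ _ _ _ (fun hh => hk hh.symm)]

-- ---------- vget/vset/gget/gset under shape hypotheses ----------

theorem rect_row (h w : Nat) (v : List (List Bool)) (hr : Rect h w v) (k : Nat) (hk : k < h) :
    (v.getD k []).length = w := by
  have hr1 := hr.1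
  have hkl : k < v.length := by omega
  rw [List.getD_eq_getElem _ _ hkl]
  exact hr.2 _ (List.getElem_mem hkl)

theorem good_row (h w : Nat) (g : List (List Int)) (hg : GOOD h w g) (k : Nat) (hk : k < h) :
    w ≤ (g.getD k []).length := hg.2 k hk

theorem vget_vset (h w : Nat) (v : List (List Bool)) (hr : Rect h w v)
    (p : Int × Int) (hp : InR h w p) (x y : Int) (hx : 0 ≤ x) (hy : 0 ≤ y) :
    vget (vset v p.1 p.2) x y = if x = p.1 ∧ y = p.2 then true else vget v x y := by
  obtain ⟨hp1, hp2, hp3, hp4⟩ := hp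
  have hr1 := hr.1
  have hi : p.1.toNat < v.length := by omega
  have hj : p.2.toNat < (v.getD p.1.toNat []).length := by
    rw [rect_row h w v hr _ (by omega)]; omega
  unfold vget vset
  rw [getD2_set2 _ _ _ _ _ _ _ hi hj]
  exact if_congr (by omega) rfl rfl

theorem rect_vset (h w : Nat) (v : List (List Bool)) (hr : Rect h w v) (x y : Int) :
    Rect h w (vset v x y) := by
  by_cases hxl : x.toNat < v.length
  · refine ⟨by simpa [vset] using hr.1, ?_⟩
    intro r hrm
    unfold vset at hrm
    rcases List.mem_or_eq_of_mem_set hrm with hm | hm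
    · exact hr.2 _ hm
    · subst hm
      rw [List.length_set, List.getD_eq_getElem _ _ hxl]
      exact hr.2 _ (List.getElem_mem hxl)
  · have : vset v x y = v := by
      unfold vset; exact List.set_eq_of_length_le (by omega)
    rw [this]; exact hr

theorem good_gset (h w : Nat) (g : List (List Int)) (hg : GOOD h w g) (x y : Int) (v8 : Int) :
    GOOD h w (gset g x y v8) := by
  refine ⟨by simpa [gset] using hg.1, ?_⟩
  intro k hk
  unfold gset
  rw [getD2_set2_rowlen]
  exact hg.2 k hk

theorem gset_rowlen (g : List (List Int)) (x y : Int) (v8 : Int) (k : Nat) :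
    ((gset g x y v8).getD k []).length = (g.getD k []).length := by
  unfold gset; rw [getD2_set2_rowlen]

theorem vget_replicate (h w : Nat) (x y : Int) :
    vget (List.replicate h (List.replicate w false)) x y = false := by
  have inner : ∀ n : Nat, (List.replicate w false).getD n false = false := by
    intro n
    by_cases hn : n < w
    · rw [List.getD_replicate _ hn]
    · rw [List.getD_eq_getElem?_getD, List.getElem?_eq_none (by simp; omega)]
      rfl
  unfold vget
  by_cases hx : x.toNat < h
  · rw [List.getD_replicate _ hx]
    exact inner _
  · rw [List.getD_eq_getElem?_getD (l := List.replicate h (List.replicate w false)),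
        List.getElem?_eq_none (by simp; omega)]
    rfl

theorem rect_replicate (h w : Nat) : Rect h w (List.replicate h (List.replicate w false)) := by
  constructor
  · simp
  · intro r hr
    rw [List.eq_of_mem_replicate hr]; simp

-- ---------- paint ----------

theorem paint_cons (g : List (List Int)) (c : Int × Int) (L : List (Int × Int)) :
    paint g (c :: L) = paint (gset g c.1 c.2 8) L := rfl

theorem good_paint (h w : Nat) : ∀ (L : List (Int × Int)) (g : List (List Int)),
    GOOD h w g → GOOD h w (paint g L) := by
  intro L
  induction L with
  | nil => intro g hg; exact hg
  | cons c L ih => intro g hg; rw [paint_cons]; exact ih _ (good_gset h w g hg _ _ _)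

theorem paint_length : ∀ (L : List (Int × Int)) (g : List (List Int)),
    (paint g L).length = g.length := by
  intro L
  induction L with
  | nil => intro g; rfl
  | cons c L ih => intro g; rw [paint_cons, ih]; simp [gset]

theorem paint_rowlen : ∀ (L : List (Int × Int)) (g : List (List Int)) (k : Nat),
    ((paint g L).getD k []).length = (g.getD k []).length := by
  intro L
  induction L with
  | nil => intro g k; rfl
  | cons c L ih => intro g k; rw [paint_cons, ih, gset_rowlen]

theorem entry_paint (h w : Nat) : ∀ (L : List (Int × Int)) (g : List (List Int)),
    GOOD h w g → (∀ p ∈ L, InR h w p) → ∀ (k j : Nat),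
    ((paint g L).getD k []).getD j 0 =
      if ((k : Int), (j : Int)) ∈ L then (8 : Int) else ((g.getD k []).getD j 0) := by
  intro L
  induction L with
  | nil => intro g _ _ k j; simp [paint]
  | cons c L ih =>
    intro g hg hL k j
    rw [paint_cons, ih _ (good_gset h w g hg _ _ _) (fun p hp => hL p (by simp [hp])) k j]
    have hc := hL c (by simp)
    obtain ⟨hc1, hc2, hc3, hc4⟩ := hc
    have hg1 := hg.1
    have hi : c.1.toNat < g.length := by omega
    have hj : c.2.toNat < (g.getD c.1.toNat []).length := by
      have := good_row h w g hg c.1.toNat (by omega); omega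
    by_cases hmemL : ((k : Int), (j : Int)) ∈ L
    · simp [hmemL]
    · by_cases hceq : ((k : Int), (j : Int)) = c
      · have hk : k = c.1.toNat := by
          have := congrArg Prod.fst hceq; simp at this; omega
        have hjj : j = c.2.toNat := by
          have := congrArg Prod.snd hceq; simp at this; omega
        simp only [List.mem_cons, hceq, true_or, if_true]
        unfold gset
        rw [getD2_set2 _ _ _ _ _ _ _ hi hj]
        simp [hk, hjj]
      · simp only [hmemL, if_false, List.mem_cons, hceq, false_or]
        unfold gset
        rw [getD2_set2 _ _ _ _ _ _ _ hi hj]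
        have : ¬(k = c.1.toNat ∧ j = c.2.toNat) := by
          intro ⟨hk, hjj⟩
          apply hceq
          have e1 : (k : Int) = c.1 := by omega
          have e2 : (j : Int) = c.2 := by omega
          exact Prod.ext e1 e2
        simp [this]

theorem paint_eq_of_mem_iff (h w : Nat) (g : List (List Int)) (hg : GOOD h w g)
    (L L' : List (Int × Int)) (hL : ∀ p ∈ L, InR h w p) (hL' : ∀ p ∈ L', InR h w p)
    (hm : ∀ p, p ∈ L ↔ p ∈ L') : paint g L = paint g L' := by
  apply List.ext_getElem
  · rw [paint_length, paint_length]
  · intro i h1 h2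
    apply List.ext_getElem
    · have := paint_rowlen L g i
      have := paint_rowlen L' g i
      simp only [← List.getD_eq_getElem _ ([] : List Int) h1, ← List.getD_eq_getElem _ ([] : List Int) h2]
      omega
    · intro j hj1 hj2
      have e1 : (paint g L)[i] = (paint g L).getD i [] := (List.getD_eq_getElem _ _ h1).symm
      have e2 : (paint g L')[i] = (paint g L').getD i [] := (List.getD_eq_getElem _ _ h2).symm
      rw [← List.getD_eq_getElem _ (0 : Int) hj1, ← List.getD_eq_getElem _ (0 : Int) hj2]
      simp only [e1, e2]
      rw [entry_paint h w L g hg hL, entry_paint h w L' g hg hL']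
      exact if_congr (hm _) rfl rfl

-- ---------- cardinalities and sums over nodup lists ----------

theorem length_le_of_nodup_subset {α : Type} [DecidableEq α] (l1 l2 : List α)
    (h1 : l1.Nodup) (hs : ∀ p ∈ l1, p ∈ l2) : l1.length ≤ l2.length :=
  (List.subperm_of_subset h1 hs).length_le

theorem perm_of_nodup_mem_iff {α : Type} [DecidableEq α] (l1 l2 : List α)
    (h1 : l1.Nodup) (h2 : l2.Nodup) (hm : ∀ a, a ∈ l1 ↔ a ∈ l2) : l1.Perm l2 :=
  (List.perm_ext_iff_of_nodup h1 h2).mpr hm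

theorem length_append_le_of_nodup {α : Type} [DecidableEq α] (l1 l2 C : List α)
    (h1 : l1.Nodup) (h2 : l2.Nodup) (hd : ∀ p ∈ l1, p ∉ l2)
    (hs1 : ∀ p ∈ l1, p ∈ C) (hs2 : ∀ p ∈ l2, p ∈ C) :
    l1.length + l2.length ≤ C.length := by
  have hnd : (l1 ++ l2).Nodup := by
    rw [List.nodup_append]
    exact ⟨h1, h2, fun a ha b hb hab => hd a ha (hab ▸ hb)⟩
  have := length_le_of_nodup_subset (l1 ++ l2) C hnd (by
    intro p hp
    rcases List.mem_append.mp hp with hp | hp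
    · exact hs1 p hp
    · exact hs2 p hp)
  simpa using this

-- ---------- the 'ones' set ----------

theorem mem_onesOf (grid : List (List Int)) (h w : Nat) (p : Int × Int) :
    p ∈ onesOf grid h w ↔ InR h w p ∧ gget grid p.1 p.2 = 1 := by
  unfold onesOf
  rw [PySem.Set.mem_ofList, List.mem_flatMap]
  constructor
  · rintro ⟨i, hi, hp⟩
    rw [List.mem_range] at hi
    rw [List.mem_filterMap] at hp
    obtain ⟨j, hj, hpj⟩ := hp
    rw [List.mem_range] at hj
    split at hpj
    · rename_i hone
      obtain rfl : ((i : Int), (j : Int)) = p := Option.some.inj hpj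
      refine ⟨⟨?_, ?_, ?_, ?_⟩, hone⟩ <;> simp <;> omega
    · exact absurd hpj (by simp)
  · rintro ⟨⟨h1, h2, h3, h4⟩, hone⟩
    refine ⟨p.1.toNat, ?_, ?_⟩
    · rw [List.mem_range]; omega
    · rw [List.mem_filterMap]
      refine ⟨p.2.toNat, by rw [List.mem_range]; omega, ?_⟩
      rw [Int.toNat_of_nonneg h1, Int.toNat_of_nonneg h3, if_pos hone]

theorem onesOf_nodup (grid : List (List Int)) (h w : Nat) : (onesOf grid h w).Nodup :=
  PySem.Set.nodup_ofList _

theorem onesOf_length_le (grid : List (List Int)) (h w : Nat) :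
    (onesOf grid h w).length ≤ h * w := by
  unfold onesOf
  refine le_trans (PySem.Set.length_ofList_le _) ?_
  rw [List.length_flatMap]
  refine le_trans (List.sum_le_card_nsmul _ w ?_) (by simp)
  intro x hx
  simp only [List.mem_map] at hx
  obtain ⟨i, _, rfl⟩ := hx
  exact le_trans (List.length_filterMap_le _ _) (by simp)

-- ---------- neighbour lemmas ----------

theorem mem_nbrs (p q : Int × Int) :
    q ∈ nbrs p ↔ (q.1 = p.1 + 1 ∧ q.2 = p.2) ∨ (q.1 = p.1 - 1 ∧ q.2 = p.2) ∨
      (q.1 = p.1 ∧ q.2 = p.2 + 1) ∨ (q.1 = p.1 ∧ q.2 = p.2 - 1) := by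
  simp [nbrs, Prod.ext_iff]

theorem nbrs_symm (p q : Int × Int) (h : q ∈ nbrs p) : p ∈ nbrs q := by
  rw [mem_nbrs] at h ⊢; omega

theorem nbrs_eq_map (x y : Int) : nbrs (x, y) = neighA.map (fun d => (x + d.1, y + d.2)) := by
  simp [nbrs, neighA]
  omega

theorem delta_mem_nbrs (x y : Int) (d : Int × Int) (hd : d ∈ neighA) :
    (x + d.1, y + d.2) ∈ nbrs (x, y) := by
  rw [nbrs_eq_map]
  exact List.mem_map.mpr ⟨d, hd, rfl⟩

theorem right_mem_nbrs (x y : Int) : (x, y + 1) ∈ nbrs (x, y) := by simp [nbrs]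
theorem down_mem_nbrs (x y : Int) : (x + 1, y) ∈ nbrs (x, y) := by simp [nbrs]

-- ---------- saturation (B's component computation) ----------

theorem satLoop_mono (ones : List (Int × Int)) :
    ∀ (f : Nat) (c : List (Int × Int)) (p : Int × Int), p ∈ c → p ∈ satLoop ones f c := by
  intro f
  induction f with
  | zero => intro c p hp; exact hp
  | succ f ih =>
    intro c p hp
    rw [satLoop]
    split
    · exact hp
    · exact ih _ p ((PySem.Set.mem_union _ _ _).mpr (Or.inl hp))

theorem satLoop_subset (ones : List (Int × Int)) :
    ∀ (f : Nat) (c : List (Int × Int)), (∀ p ∈ c, p ∈ ones) →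
    ∀ p ∈ satLoop ones f c, p ∈ ones := by
  intro f
  induction f with
  | zero => intro c hc p hp; exact hc p hp
  | succ f ih =>
    intro c hc p hp
    rw [satLoop] at hp
    split at hp
    · exact hc p hp
    · refine ih _ ?_ p hp
      intro q hq
      rcases (PySem.Set.mem_union _ _ _).mp hq with hq | hq
      · exact hc q hq
      · rw [PySem.Set.mem_ofList _ _] at hq
        obtain ⟨r, _, hqr⟩ := List.mem_flatMap.mp hq
        have := List.mem_filter.mp hqr
        simpa using this.2

theorem satLoop_nodup (ones : List (Int × Int)) :
    ∀ (f : Nat) (c : List (Int × Int)), c.Nodup → (satLoop ones f c).Nodup := by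
  intro f
  induction f with
  | zero => intro c hc; exact hc
  | succ f ih =>
    intro c hc
    rw [satLoop]
    split
    · exact hc
    · exact ih _ (PySem.Set.nodup_union _ _ hc)

theorem satLoop_least (ones : List (Int × Int)) (P : Int × Int → Prop) (hP : ClosedP ones P) :
    ∀ (f : Nat) (c : List (Int × Int)), (∀ p ∈ c, P p) → ∀ p ∈ satLoop ones f c, P p := by
  intro f
  induction f with
  | zero => intro c hc p hp; exact hc p hp
  | succ f ih =>
    intro c hc p hp
    rw [satLoop] at hp
    split at hp
    · exact hc p hp
    · refine ih _ ?_ p hp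
      intro q hq
      rcases (PySem.Set.mem_union _ _ _).mp hq with hq | hq
      · exact hc q hq
      · rw [PySem.Set.mem_ofList _ _] at hq
        obtain ⟨r, hr, hqr⟩ := List.mem_flatMap.mp hq
        have hf := List.mem_filter.mp hqr
        exact hP r (hc r hr) q hf.1 (by simpa using hf.2)

theorem append_progress (c F : List (Int × Int)) (hne : PySem.Set.equal (c ++ F) c = false) :
    c.length < (c ++ F).length := by
  cases F with
  | nil =>
    exfalso
    rw [List.append_nil] at hne
    have : PySem.Set.equal c c = true := (PySem.Set.equal_iff c c).mpr (fun x => Iff.rfl)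
    rw [this] at hne
    exact Bool.false_ne_true hne.symm
  | cons a F => simp [List.length_append]

theorem grow_progress (ones c : List (Int × Int))
    (hne : PySem.Set.equal (growOnce ones c) c = false) :
    c.length < (growOnce ones c).length := by
  have hu : growOnce ones c = _ := PySem.Set.update_eq_append_filter c
    (PySem.Set.ofList (c.flatMap (fun p => (nbrs p).filter (fun q => decide (q ∈ ones)))))
  rw [hu] at hne ⊢
  exact append_progress _ _ hne

theorem satLoop_closed (ones : List (Int × Int)) :
    ∀ (f : Nat) (c : List (Int × Int)), c.Nodup → (∀ p ∈ c, p ∈ ones) →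
    ones.length < f + c.length →
    ClosedP ones (fun p => p ∈ satLoop ones f c) := by
  intro f
  induction f with
  | zero =>
    intro c hcnd hcs hlt
    exfalso
    have := length_le_of_nodup_subset c ones hcnd hcs
    omega
  | succ f ih =>
    intro c hcnd hcs hlt
    rw [satLoop]
    split
    · rename_i heq
      intro p hp q hq hqones
      have hmem : q ∈ growOnce ones c := by
        apply (PySem.Set.mem_union _ _ _).mpr
        right
        rw [PySem.Set.mem_ofList _ _]
        apply List.mem_flatMap.mpr
        exact ⟨p, hp, List.mem_filter.mpr ⟨hq, by simpa using hqones⟩⟩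
      exact ((PySem.Set.equal_iff _ _).mp heq q).mp hmem
    · rename_i hne
      apply ih
      · exact PySem.Set.nodup_union _ _ hcnd
      · intro q hq
        rcases (PySem.Set.mem_union _ _ _).mp hq with hq | hq
        · exact hcs q hq
        · rw [PySem.Set.mem_ofList _ _] at hq
          obtain ⟨r, _, hqr⟩ := List.mem_flatMap.mp hq
          have := List.mem_filter.mp hqr
          simpa using this.2
      · have := grow_progress ones c (Bool.eq_false_iff.mpr hne)
        omega


-- ---------- A's edge counting on the current grid vs B's on the ones-set ----------

theorem gget_paint (h w : Nat) (g : List (List Int)) (hg : GOOD h w g)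
    (L : List (Int × Int)) (hL : ∀ p ∈ L, InR h w p)
    (p : Int × Int) (hp1 : 0 ≤ p.1) (hp3 : 0 ≤ p.2) :
    gget (paint g L) p.1 p.2 = if p ∈ L then 8 else gget g p.1 p.2 := by
  have e1 : ((p.1.toNat : Int), (p.2.toNat : Int)) = p := by
    apply Prod.ext <;> simp <;> omega
  have := entry_paint h w L g hg hL p.1.toNat p.2.toNat
  rw [e1] at this
  unfold gget
  exact this

theorem edgeStep_eq_degC (g : List (List Int)) (h w : Nat) (ones C : List (Int × Int))
    (honesR : ∀ p ∈ ones, InR h w p)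
    (hCcl : ClosedP ones (fun p => p ∈ C))
    (hCget : ∀ p ∈ C, gget g p.1 p.2 = 1)
    (hV2 : ∀ p, InR h w p → gget g p.1 p.2 = 1 → p ∈ ones)
    (x y : Int) (hxy : (x, y) ∈ C) :
    edgeStep g (h : Int) (w : Int) x y = degC ones (x, y) := by
  have h1 : (0 ≤ x ∧ x < (h : Int) ∧ 0 ≤ y + 1 ∧ y + 1 < (w : Int) ∧ gget g x (y + 1) = 1) ↔
      (x, y + 1) ∈ ones := by
    constructor
    · rintro ⟨a, b, c, d, e⟩; exact hV2 (x, y + 1) ⟨a, b, c, d⟩ e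
    · intro hm
      have hin := honesR _ hm
      have hC := hCcl (x, y) hxy _ (right_mem_nbrs x y) hm
      exact ⟨hin.1, hin.2.1, hin.2.2.1, hin.2.2.2, hCget _ hC⟩
  have h2 : (0 ≤ x + 1 ∧ x + 1 < (h : Int) ∧ 0 ≤ y ∧ y < (w : Int) ∧ gget g (x + 1) y = 1) ↔
      (x + 1, y) ∈ ones := by
    constructor
    · rintro ⟨a, b, c, d, e⟩; exact hV2 (x + 1, y) ⟨a, b, c, d⟩ e
    · intro hm
      have hin := honesR _ hm
      have hC := hCcl (x, y) hxy _ (down_mem_nbrs x y) hm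
      exact ⟨hin.1, hin.2.1, hin.2.2.1, hin.2.2.2, hCget _ hC⟩
  unfold edgeStep degC
  rw [if_congr h1 rfl rfl, if_congr h2 rfl rfl]

-- ---------- the push loop of A ----------

def PushOut (h w : Nat) (C : List (Int × Int)) (M0 : Int × Int → Prop)
    (cells1 st : List (Int × Int)) (res : List (List Bool) × List (Int × Int)) : Prop :=
  Rect h w res.1 ∧ (∀ p ∈ res.2, p ∈ C) ∧ res.2.Nodup ∧
  (∀ p ∈ st, p ∈ res.2) ∧ (∀ p ∈ cells1, p ∉ res.2) ∧
  st.length ≤ res.2.length ∧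
  (∀ p, InR h w p → (vget res.1 p.1 p.2 = true ↔ (M0 p ∨ p ∈ res.2 ∨ p ∈ cells1)))

theorem pushFold (g : List (List Int)) (h w : Nat) (ones C : List (Int × Int))
    (M0 : Int × Int → Prop)
    (honesR : ∀ p ∈ ones, InR h w p)
    (hCcl : ClosedP ones (fun p => p ∈ C))
    (hCget : ∀ p ∈ C, gget g p.1 p.2 = 1)
    (hV2 : ∀ p, InR h w p → gget g p.1 p.2 = 1 → p ∈ ones)
    (x y : Int) (hxy : (x, y) ∈ C)
    (cells1 : List (Int × Int)) :
    ∀ (L : List (Int × Int)) (vis : List (List Bool)) (st : List (Int × Int)),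
      (∀ d ∈ L, d ∈ neighA) →
      Rect h w vis →
      (∀ p ∈ st, p ∈ C) → st.Nodup →
      (∀ p ∈ cells1, p ∉ st) →
      (∀ p, InR h w p → (vget vis p.1 p.2 = true ↔ (M0 p ∨ p ∈ st ∨ p ∈ cells1))) →
      PushOut h w C M0 cells1 st (L.foldl (pushStep g (h : Int) (w : Int) x y) (vis, st)) ∧
      (∀ d ∈ L, (x + d.1, y + d.2) ∈ ones →
        (M0 (x + d.1, y + d.2) ∨
          (x + d.1, y + d.2) ∈ (L.foldl (pushStep g (h : Int) (w : Int) x y) (vis, st)).2 ∨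
          (x + d.1, y + d.2) ∈ cells1)) := by
  intro L
  induction L with
  | nil =>
    intro vis st _ hR hsC hsnd hdisj hmk
    refine ⟨⟨hR, hsC, hsnd, fun p hp => hp, fun p hp hq => hdisj p hp hq, le_refl _, hmk⟩, ?_⟩
    intro d hd
    simp at hd
  | cons d L ih =>
    intro vis st hL hR hsC hsnd hdisj hmk
    rw [List.foldl_cons]
    have hdA : d ∈ neighA := hL d (by simp)
    have hnb : (x + d.1, y + d.2) ∈ nbrs (x, y) := delta_mem_nbrs x y d hdA
    by_cases hg : (0 ≤ x + d.1 ∧ x + d.1 < (h : Int) ∧ 0 ≤ y + d.2 ∧ y + d.2 < (w : Int) ∧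
        gget g (x + d.1) (y + d.2) = 1 ∧ vget vis (x + d.1) (y + d.2) = false)
    · -- the neighbour is pushed and marked
      have hstep : pushStep g (h : Int) (w : Int) x y (vis, st) d =
          (vset vis (x + d.1) (y + d.2), (x + d.1, y + d.2) :: st) := by
        simp only [pushStep]
        rw [if_pos hg]
      rw [hstep]
      obtain ⟨hg1, hg2, hg3, hg4, hg5, hg6⟩ := hg
      have hqIn : InR h w (x + d.1, y + d.2) := ⟨hg1, hg2, hg3, hg4⟩
      have hqones : (x + d.1, y + d.2) ∈ ones := hV2 _ hqIn hg5
      have hqC : (x + d.1, y + d.2) ∈ C := hCcl (x, y) hxy _ hnb hqones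
      have hqnm : ¬(M0 (x + d.1, y + d.2) ∨ (x + d.1, y + d.2) ∈ st ∨
          (x + d.1, y + d.2) ∈ cells1) := by
        intro hh
        rw [(hmk _ hqIn).mpr hh] at hg6
        simp at hg6
      have hmk' : ∀ p, InR h w p → (vget (vset vis (x + d.1) (y + d.2)) p.1 p.2 = true ↔
          (M0 p ∨ p ∈ (x + d.1, y + d.2) :: st ∨ p ∈ cells1)) := by
        intro p hpIn
        rw [vget_vset h w vis hR _ hqIn p.1 p.2 hpIn.1 hpIn.2.2.1]
        by_cases hpq : p = (x + d.1, y + d.2)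
        · subst hpq
          simp
        · have : ¬(p.1 = (x + d.1, y + d.2).1 ∧ p.2 = (x + d.1, y + d.2).2) := by
            intro hh
            exact hpq (Prod.ext hh.1 hh.2)
          rw [if_neg this, hmk p hpIn]
          simp only [List.mem_cons]
          constructor
          · rintro (h | h | h)
            · exact Or.inl h
            · exact Or.inr (Or.inl (Or.inr h))
            · exact Or.inr (Or.inr h)
          · rintro (h | (h | h) | h)
            · exact Or.inl h
            · exact absurd h hpq
            · exact Or.inr (Or.inl h)
            · exact Or.inr (Or.inr h)
      have ihres := ih (vset vis (x + d.1) (y + d.2)) ((x + d.1, y + d.2) :: st)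
        (fun d' hd' => hL d' (by simp [hd']))
        (rect_vset h w vis hR _ _)
        (by
          intro p hp
          rcases List.mem_cons.mp hp with hp | hp
          · exact hp ▸ hqC
          · exact hsC p hp)
        (List.nodup_cons.mpr ⟨fun hh => hqnm (Or.inr (Or.inl hh)), hsnd⟩)
        (by
          intro p hp
          rw [List.mem_cons]
          rintro (hh | hh)
          · exact hqnm (Or.inr (Or.inr (hh ▸ hp)))
          · exact hdisj p hp hh)
        hmk'
      obtain ⟨⟨pR, pC, pnd, pst, pdisj, plen, pmk⟩, pcov⟩ := ihres
      refine ⟨⟨pR, pC, pnd, ?_, pdisj, ?_, pmk⟩, ?_⟩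
      · intro p hp
        exact pst p (by simp [hp])
      · have := plen
        simp at this
        omega
      · intro d' hd'
        rcases List.mem_cons.mp hd' with hd' | hd'
        · subst hd'
          intro _
          exact Or.inr (Or.inl (pst _ (by simp)))
        · exact pcov d' hd'
    · -- nothing happens for this neighbour
      have hstep : pushStep g (h : Int) (w : Int) x y (vis, st) d = (vis, st) := by
        simp only [pushStep]
        rw [if_neg hg]
      rw [hstep]
      have ihres := ih vis st (fun d' hd' => hL d' (by simp [hd'])) hR hsC hsnd hdisj hmk
      obtain ⟨hPO, pcov⟩ := ihres
      refine ⟨hPO, ?_⟩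
      intro d' hd'
      rcases List.mem_cons.mp hd' with hd' | hd'
      · subst hd'
        intro hqones
        have hqIn : InR h w (x + d'.1, y + d'.2) := honesR _ hqones
        have hqC : (x + d'.1, y + d'.2) ∈ C := hCcl (x, y) hxy _ (delta_mem_nbrs x y d' hdA) hqones
        have hq1 : gget g (x + d'.1) (y + d'.2) = 1 := hCget _ hqC
        have hqv : vget vis (x + d'.1) (y + d'.2) = true := by
          rcases Bool.eq_false_or_eq_true (vget vis (x + d'.1) (y + d'.2)) with ht | hf
          · exact ht
          · exact absurd ⟨hqIn.1, hqIn.2.1, hqIn.2.2.1, hqIn.2.2.2, hq1, hf⟩ hg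
        rcases (hmk _ hqIn).mp hqv with hh | hh | hh
        · exact Or.inl hh
        · exact Or.inr (Or.inl (hPO.2.2.2.1 _ hh))
        · exact Or.inr (Or.inr hh)
      · exact pcov d' hd'


-- ---------- A's DFS loop computes exactly the component C ----------

def DfsOut (h w : Nat) (ones C : List (Int × Int)) (M0 : Int × Int → Prop)
    (stack cells : List (Int × Int)) (e : Nat)
    (r : List (List Bool) × List (Int × Int) × Nat) : Prop :=
  ∃ ext, r.2.1 = cells ++ ext ∧ (∀ p ∈ r.2.1, p ∈ C) ∧ r.2.1.Nodup ∧ Rect h w r.1 ∧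
    (∀ p, InR h w p → (vget r.1 p.1 p.2 = true ↔ (M0 p ∨ p ∈ r.2.1))) ∧
    (∀ p ∈ r.2.1, ∀ q ∈ nbrs p, q ∈ ones → (M0 q ∨ q ∈ r.2.1)) ∧
    (∀ p ∈ stack, p ∈ r.2.1) ∧
    r.2.2 = e + (ext.map (degC ones)).sum

theorem dfsMain (g : List (List Int)) (h w : Nat) (ones C : List (Int × Int))
    (M0 : Int × Int → Prop)
    (honesR : ∀ p ∈ ones, InR h w p)
    (hCsub : ∀ p ∈ C, p ∈ ones)
    (hCnd : C.Nodup)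
    (hCcl : ClosedP ones (fun p => p ∈ C))
    (hCget : ∀ p ∈ C, gget g p.1 p.2 = 1)
    (hV2 : ∀ p, InR h w p → gget g p.1 p.2 = 1 → p ∈ ones) :
    ∀ (fuel : Nat) (vis : List (List Bool)) (stack cells : List (Int × Int)) (e : Nat),
      Rect h w vis →
      (∀ p ∈ stack, p ∈ C) → stack.Nodup →
      (∀ p ∈ cells, p ∈ C) → cells.Nodup →
      (∀ p ∈ cells, p ∉ stack) →
      (∀ p, InR h w p → (vget vis p.1 p.2 = true ↔ (M0 p ∨ p ∈ stack ∨ p ∈ cells))) →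
      (∀ p ∈ cells, ∀ q ∈ nbrs p, q ∈ ones → (M0 q ∨ q ∈ stack ∨ q ∈ cells)) →
      2 * (C.length - cells.length - stack.length) + stack.length ≤ fuel →
      DfsOut h w ones C M0 stack cells e (dfsLoop g (h : Int) (w : Int) fuel vis stack cells e) := by
  intro fuel
  induction fuel with
  | zero =>
    intro vis stack cells e hR hstC hstnd hceC hcend hdisj hmk hcl hfuel
    have hst : stack = [] := by
      cases stack with
      | nil => rfl
      | cons a s => simp at hfuel
    subst hst
    refine ⟨[], by simp [dfsLoop], ?_, ?_, ?_, ?_, ?_, ?_, ?_⟩ <;>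
      simp only [dfsLoop]
    · exact hceC
    · exact hcend
    · exact hR
    · intro p hp
      rw [hmk p hp]
      simp
    · intro p hp q hq hqo
      rcases hcl p hp q hq hqo with hh | hh | hh
      · exact Or.inl hh
      · simp at hh
      · exact Or.inr hh
    · intro p hp
      simp at hp
    · simp
  | succ f ih =>
    intro vis stack cells e hR hstC hstnd hceC hcend hdisj hmk hcl hfuel
    cases stack with
    | nil =>
      refine ⟨[], by simp [dfsLoop], ?_, ?_, ?_, ?_, ?_, ?_, ?_⟩ <;>
        simp only [dfsLoop]
      · exact hceC
      · exact hcend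
      · exact hR
      · intro p hp
        rw [hmk p hp]
        simp
      · intro p hp q hq hqo
        rcases hcl p hp q hq hqo with hh | hh | hh
        · exact Or.inl hh
        · simp at hh
        · exact Or.inr hh
      · intro p hp
        simp at hp
      · simp
    | cons hd st =>
      obtain ⟨x, y⟩ := hd
      have hxy : (x, y) ∈ C := hstC _ (by simp)
      have hxync : (x, y) ∉ cells := fun hh => hdisj _ hh (by simp)
      have hxynst : (x, y) ∉ st := (List.nodup_cons.mp hstnd).1
      have hstnd' : st.Nodup := (List.nodup_cons.mp hstnd).2
      -- the push fold
      have hPF := pushFold g h w ones C M0 honesR hCcl hCget hV2 x y hxy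
        (cells ++ [(x, y)]) neighA vis st (fun d hd => hd) hR
        (fun p hp => hstC p (by simp [hp])) hstnd'
        (by
          intro p hp
          rcases List.mem_append.mp hp with hp | hp
          · exact fun hh => hdisj p hp (by simp [hh])
          · simp at hp
            subst hp
            exact hxynst)
        (by
          intro p hpIn
          rw [hmk p hpIn]
          simp only [List.mem_cons, List.mem_append, List.mem_singleton]
          tauto)
      obtain ⟨⟨pR, pC, pnd, pst, pdisj, plen, pmk⟩, pcov⟩ := hPF
      have hc1nd : (cells ++ [(x, y)]).Nodup := by
        rw [List.nodup_append]
        exact ⟨hcend, by simp, by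
          intro a ha b hb hab
          simp at hb
          subst hb
          exact hxync (hab ▸ ha)⟩
      have hc1C : ∀ p ∈ cells ++ [(x, y)], p ∈ C := by
        intro p hp
        rcases List.mem_append.mp hp with hp | hp
        · exact hceC p hp
        · simp at hp
          subst hp
          exact hxy
      have hlen1 : (cells ++ [(x, y)]).length + _ ≤ C.length :=
        length_append_le_of_nodup (cells ++ [(x, y)])
          ((neighA.foldl (pushStep g (h : Int) (w : Int) x y) (vis, st)).2) C
          hc1nd pnd pdisj hc1C pC
      have hlen0 : cells.length + ((x, y) :: st).length ≤ C.length :=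
        length_append_le_of_nodup cells ((x, y) :: st) C hcend hstnd hdisj hceC hstC
      have hIH := ih (neighA.foldl (pushStep g (h : Int) (w : Int) x y) (vis, st)).1
        (neighA.foldl (pushStep g (h : Int) (w : Int) x y) (vis, st)).2
        (cells ++ [(x, y)]) (e + edgeStep g (h : Int) (w : Int) x y)
        pR pC pnd hc1C hc1nd pdisj pmk
        (by
          intro p hp q hq hqo
          rcases List.mem_append.mp hp with hp | hp
          · rcases hcl p hp q hq hqo with hh | hh | hh
            · exact Or.inl hh
            · rcases List.mem_cons.mp hh with hh | hh
              · exact Or.inr (Or.inr (by simp [hh]))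
              · exact Or.inr (Or.inl (pst q hh))
            · exact Or.inr (Or.inr (by simp [hh]))
          · simp at hp
            subst hp
            rw [nbrs_eq_map] at hq
            obtain ⟨d, hd, rfl⟩ := List.mem_map.mp hq
            exact pcov d hd hqo)
        (by
          simp only [List.length_append, List.length_cons, List.length_singleton] at *
          omega)
      obtain ⟨ext', hexteq, hsubC, hnd', hRect', hmk', hcl', hstk', hsum'⟩ := hIH
      refine ⟨(x, y) :: ext', ?_, ?_, ?_, ?_, ?_, ?_, ?_, ?_⟩ <;>
        simp only [dfsLoop]
      · rw [hexteq, List.append_assoc]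
        rfl
      · exact hsubC
      · exact hnd'
      · exact hRect'
      · exact hmk'
      · exact hcl'
      · intro p hp
        rcases List.mem_cons.mp hp with hp | hp
        · subst hp
          rw [hexteq]
          exact List.mem_append.mpr (Or.inl (by simp))
        · exact hstk' _ (pst p hp)
      · rw [hsum', edgeStep_eq_degC g h w ones C honesR hCcl hCget hV2 x y hxy]
        simp [List.map_cons, List.sum_cons]
        omega


-- ---------- the joint invariant of A's and B's outer double loops ----------

structure LoopInv (g0 : List (List Int)) (h w : Nat) (ones : List (Int × Int))
    (sA : List (List Int) × List (List Bool)) (sB : List (List Int) × List (Int × Int)) : Prop where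
  geq : sB.1 = sA.1
  good : GOOD h w sA.1
  rect : Rect h w sA.2
  rem : ∀ p : Int × Int, p ∈ sB.2 ↔ (p ∈ ones ∧ vget sA.2 p.1 p.2 = false)
  mko : ∀ p : Int × Int, InR h w p → vget sA.2 p.1 p.2 = true → p ∈ ones
  mkc : ∀ p : Int × Int, InR h w p → vget sA.2 p.1 p.2 = true →
    ∀ q ∈ nbrs p, q ∈ ones → vget sA.2 q.1 q.2 = true
  val1 : ∀ p ∈ ones, vget sA.2 p.1 p.2 = false → gget sA.1 p.1 p.2 = 1
  val2 : ∀ p : Int × Int, InR h w p → gget sA.1 p.1 p.2 = 1 → p ∈ ones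

theorem stepInv (g0 : List (List Int)) (h w : Nat) (ones : List (Int × Int))
    (honesR : ∀ p ∈ ones, InR h w p) (hond : ones.Nodup) (hlen : ones.length ≤ h * w)
    (i j : Int) (hiw : 0 ≤ i ∧ i < (h : Int) ∧ 0 ≤ j ∧ j < (w : Int))
    (sA : List (List Int) × List (List Bool)) (sB : List (List Int) × List (Int × Int))
    (hInv : LoopInv g0 h w ones sA sB) :
    LoopInv g0 h w ones (procCell h w sA i j) (procCellB ones h w sB i j) := by
  obtain ⟨geq, good, rect, rem, mko, mkc, val1, val2⟩ := hInv
  have hijIn : InR h w (i, j) := ⟨hiw.1, hiw.2.1, hiw.2.2.1, hiw.2.2.2⟩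
  by_cases hP : ((i, j) ∈ ones ∧ vget sA.2 i j = false)
  · -- the cell is an unvisited 1-cell: both sides process its component
    obtain ⟨hone, hunm⟩ := hP
    set C := satLoop ones (h * w) (PySem.Set.ofList [(i, j)]) with hCdef
    have hsing : PySem.Set.ofList [(i, j)] = [(i, j)] := PySem.Set.ofList_eq_self_of_nodup _ (by simp)
    have hseed : (i, j) ∈ C := satLoop_mono ones (h * w) _ (i, j) (by rw [hsing]; simp)
    have hCsub : ∀ p ∈ C, p ∈ ones := satLoop_subset ones (h * w) _ (by
      rw [hsing]; intro p hp; simp at hp; subst hp; exact hone)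
    have hCnd : C.Nodup := satLoop_nodup ones (h * w) _ (by rw [hsing]; simp)
    have hCcl : ClosedP ones (fun p => p ∈ C) := satLoop_closed ones (h * w) _
      (by rw [hsing]; simp)
      (by rw [hsing]; intro p hp; simp at hp; subst hp; exact hone)
      (by rw [hsing]; simp; omega)
    have hM0C : ∀ p ∈ C, vget sA.2 p.1 p.2 = false := by
      have hl := satLoop_least ones (fun p => p ∈ C ∧ vget sA.2 p.1 p.2 = false)
        (by
          intro p hp q hq hqo
          refine ⟨hCcl p hp.1 q hq hqo, ?_⟩
          rcases Bool.eq_false_or_eq_true (vget sA.2 q.1 q.2) with ht | hf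
          · have := mkc q (honesR _ hqo) ht p (nbrs_symm p q hq) (hCsub _ hp.1)
            rw [hp.2] at this
            simp at this
          · exact hf)
        (h * w) (PySem.Set.ofList [(i, j)])
        (by rw [hsing]; intro p hp; simp at hp; subst hp; exact ⟨hseed, hunm⟩)
      intro p hp
      exact (hl p hp).2
    have hCget : ∀ p ∈ C, gget sA.1 p.1 p.2 = 1 := fun p hp => val1 p (hCsub p hp) (hM0C p hp)
    have hClen : C.length ≤ ones.length := length_le_of_nodup_subset C ones hCnd hCsub
    set out := dfsLoop sA.1 (h : Int) (w : Int) (2 * h * w + 1) (vset sA.2 i j) [(i, j)] [] 0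
      with houtdef
    have hcond : ¬(gget sA.1 i j ≠ 1 ∨ vget sA.2 i j = true) := by
      rintro (h1 | h2)
      · exact h1 (val1 (i, j) hone hunm)
      · rw [hunm] at h2; simp at h2
    have hAeq : procCell h w sA i j =
        (if out.2.1.length ≤ out.2.2 then paint sA.1 out.2.1 else sA.1, out.1) := by
      unfold procCell
      rw [if_neg hcond]
      split <;>
        rename_i hsplit
      · rw [if_pos hsplit]
        rfl
      · rw [if_neg hsplit]
    have hBeq : procCellB ones h w sB i j =
        (if C.length ≤ edgesOf ones C then paint sB.1 C else sB.1, PySem.Set.diff sB.2 C) := by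
      unfold procCellB
      rw [if_pos ((rem (i, j)).mpr ⟨hone, hunm⟩)]
      rfl
    have hdfs := dfsMain sA.1 h w ones C (fun p => vget sA.2 p.1 p.2 = true)
      honesR hCsub hCnd hCcl hCget val2
      (2 * h * w + 1) (vset sA.2 i j) [(i, j)] [] 0
      (rect_vset h w sA.2 rect i j)
      (by intro p hp; simp at hp; subst hp; exact hseed)
      (by simp) (by simp) (by simp) (by simp)
      (by
        intro p hpIn
        rw [vget_vset h w sA.2 rect (i, j) hijIn p.1 p.2 hpIn.1 hpIn.2.2.1]
        by_cases hpq : p = (i, j)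
        · subst hpq; simp
        · have hne : ¬(p.1 = (i, j).1 ∧ p.2 = (i, j).2) := fun hh => hpq (Prod.ext hh.1 hh.2)
          rw [if_neg hne]
          constructor
          · intro hm; exact Or.inl hm
          · rintro (hm | hm | hm)
            · exact hm
            · exact absurd hm (by simpa using hpq)
            · simp at hm)
      (by simp)
      (by
        have h1 : C.length ≤ h * w := le_trans hClen hlen
        have h2 : 2 * (C.length - ([] : List (Int × Int)).length - ([((i : Int), (j : Int))]).length) + ([((i : Int), (j : Int))]).length = 2 * (C.length - 1) + 1 := by
          simp
        rw [h2, show 2 * h * w + 1 = 2 * (h * w) + 1 from by ring]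
        omega)
    obtain ⟨ext, hexteq, hsubC, hnd', hRect', hmk', hcl', hstk', hsum'⟩ := hdfs
    have hmemCC : ∀ p : Int × Int, p ∈ out.2.1 ↔ p ∈ C := by
      intro p
      constructor
      · exact hsubC p
      · intro hpC
        have hleast := satLoop_least ones
          (fun p => (vget sA.2 p.1 p.2 = true ∧ InR h w p) ∨ p ∈ out.2.1)
          (by
            intro p hp q hq hqo
            rcases hp with ⟨hm, hIn⟩ | hp
            · exact Or.inl ⟨mkc p hIn hm q hq hqo, honesR _ hqo⟩
            · rcases hcl' p hp q hq hqo with hh | hh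
              · exact Or.inl ⟨hh, honesR _ hqo⟩
              · exact Or.inr hh)
          (h * w) (PySem.Set.ofList [(i, j)])
          (by
            rw [hsing]; intro p hp; simp at hp; subst hp
            exact Or.inr (hstk' _ (by simp)))
        rcases hleast p hpC with ⟨hm, _⟩ | hh
        · rw [hM0C p hpC] at hm; simp at hm
        · exact hh
    have hperm : out.2.1.Perm C := perm_of_nodup_mem_iff _ _ hnd' hCnd hmemCC
    have hlenCC : out.2.1.length = C.length := hperm.length_eq
    have hsumCC : (out.2.1.map (degC ones)).sum = (C.map (degC ones)).sum := (hperm.map _).sum_eq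
    have hextid : out.2.1 = ext := by rw [hexteq]; rfl
    have hout2 : out.2.2 = (C.map (degC ones)).sum := by
      rw [hsum', ← hsumCC, hextid]
      simp
    have hedgesB : edgesOf ones C = (C.map (degC ones)).sum := by
      unfold edgesOf
      rw [PySem.List.foldl_add_nat C
        (fun p => (if (p.1, p.2 + 1) ∈ ones then 1 else 0) +
          (if (p.1 + 1, p.2) ∈ ones then 1 else 0)) 0]
      rw [show (fun (p : Int × Int) => (if (p.1, p.2 + 1) ∈ ones then 1 else 0) +
          (if (p.1 + 1, p.2) ∈ ones then 1 else 0)) = degC ones from funext (fun p => rfl)]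
      simp
    have hdecEq : (out.2.1.length ≤ out.2.2) ↔ (C.length ≤ edgesOf ones C) := by
      rw [hlenCC, hout2, hedgesB]
    have hextIn : ∀ p ∈ out.2.1, InR h w p := fun p hp => honesR _ (hCsub _ (hsubC _ hp))
    have hCIn : ∀ p ∈ C, InR h w p := fun p hp => honesR _ (hCsub _ hp)
    have hnewmarks : ∀ p : Int × Int, InR h w p →
        (vget out.1 p.1 p.2 = true ↔ (vget sA.2 p.1 p.2 = true ∨ p ∈ C)) := by
      intro p hIn
      rw [hmk' p hIn, hmemCC p]
    -- the new grids are equal and the invariant is restored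
    rw [hAeq, hBeq]
    by_cases hdec : C.length ≤ edgesOf ones C
    · rw [if_pos hdec, if_pos (hdecEq.mpr hdec)]
      have hpaint : paint sB.1 C = paint sA.1 out.2.1 := by
        rw [geq]
        exact paint_eq_of_mem_iff h w sA.1 good C out.2.1 hCIn hextIn
          (fun p => (hmemCC p).symm)
      refine ⟨hpaint, good_paint h w out.2.1 sA.1 good, hRect', ?_, ?_, ?_, ?_, ?_⟩
      · intro p
        rw [PySem.Set.mem_diff]
        constructor
        · rintro ⟨hp1, hp2⟩
          obtain ⟨pone, punm⟩ := (rem p).mp hp1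
          refine ⟨pone, ?_⟩
          rcases Bool.eq_false_or_eq_true (vget out.1 p.1 p.2) with ht | hf
          · rcases (hnewmarks p (honesR _ pone)).mp ht with hh | hh
            · rw [punm] at hh; simp at hh
            · exact absurd hh hp2
          · exact hf
        · rintro ⟨pone, pnew⟩
          have hIn := honesR _ pone
          have punm : vget sA.2 p.1 p.2 = false := by
            rcases Bool.eq_false_or_eq_true (vget sA.2 p.1 p.2) with ht | hf
            · rw [(hnewmarks p hIn).mpr (Or.inl ht)] at pnew; simp at pnew
            · exact hf
          have pnc : p ∉ C := by
            intro hc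
            rw [(hnewmarks p hIn).mpr (Or.inr hc)] at pnew; simp at pnew
          exact ⟨(rem p).mpr ⟨pone, punm⟩, pnc⟩
      · intro p hIn hm
        rcases (hnewmarks p hIn).mp hm with hh | hh
        · exact mko p hIn hh
        · exact hCsub _ hh
      · intro p hIn hm q hq hqo
        have hqIn := honesR _ hqo
        rcases (hnewmarks p hIn).mp hm with hh | hh
        · exact (hnewmarks q hqIn).mpr (Or.inl (mkc p hIn hh q hq hqo))
        · rcases hcl' p ((hmemCC p).mpr hh) q hq hqo with hh' | hh'
          · exact (hnewmarks q hqIn).mpr (Or.inl hh')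
          · exact (hnewmarks q hqIn).mpr (Or.inr ((hmemCC q).mp hh'))
      · intro p pone pnew
        have hIn := honesR _ pone
        have punm : vget sA.2 p.1 p.2 = false := by
          rcases Bool.eq_false_or_eq_true (vget sA.2 p.1 p.2) with ht | hf
          · rw [(hnewmarks p hIn).mpr (Or.inl ht)] at pnew; simp at pnew
          · exact hf
        have pnc : p ∉ out.2.1 := by
          intro hc
          rw [(hnewmarks p hIn).mpr (Or.inr ((hmemCC p).mp hc))] at pnew; simp at pnew
        rw [gget_paint h w sA.1 good out.2.1 hextIn p hIn.1 hIn.2.2.1, if_neg pnc]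
        exact val1 p pone punm
      · intro p hIn hg
        rw [gget_paint h w sA.1 good out.2.1 hextIn p hIn.1 hIn.2.2.1] at hg
        by_cases hc : p ∈ out.2.1
        · rw [if_pos hc] at hg; simp at hg
        · rw [if_neg hc] at hg
          exact val2 p hIn hg
    · rw [if_neg hdec, if_neg (fun hh => hdec (hdecEq.mp hh))]
      refine ⟨geq, good, hRect', ?_, ?_, ?_, ?_, ?_⟩
      · intro p
        rw [PySem.Set.mem_diff]
        constructor
        · rintro ⟨hp1, hp2⟩
          obtain ⟨pone, punm⟩ := (rem p).mp hp1
          refine ⟨pone, ?_⟩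
          rcases Bool.eq_false_or_eq_true (vget out.1 p.1 p.2) with ht | hf
          · rcases (hnewmarks p (honesR _ pone)).mp ht with hh | hh
            · rw [punm] at hh; simp at hh
            · exact absurd hh hp2
          · exact hf
        · rintro ⟨pone, pnew⟩
          have hIn := honesR _ pone
          have punm : vget sA.2 p.1 p.2 = false := by
            rcases Bool.eq_false_or_eq_true (vget sA.2 p.1 p.2) with ht | hf
            · rw [(hnewmarks p hIn).mpr (Or.inl ht)] at pnew; simp at pnew
            · exact hf
          have pnc : p ∉ C := by
            intro hc
            rw [(hnewmarks p hIn).mpr (Or.inr hc)] at pnew; simp at pnew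
          exact ⟨(rem p).mpr ⟨pone, punm⟩, pnc⟩
      · intro p hIn hm
        rcases (hnewmarks p hIn).mp hm with hh | hh
        · exact mko p hIn hh
        · exact hCsub _ hh
      · intro p hIn hm q hq hqo
        have hqIn := honesR _ hqo
        rcases (hnewmarks p hIn).mp hm with hh | hh
        · exact (hnewmarks q hqIn).mpr (Or.inl (mkc p hIn hh q hq hqo))
        · rcases hcl' p ((hmemCC p).mpr hh) q hq hqo with hh' | hh'
          · exact (hnewmarks q hqIn).mpr (Or.inl hh')
          · exact (hnewmarks q hqIn).mpr (Or.inr ((hmemCC q).mp hh'))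
      · intro p pone pnew
        have hIn := honesR _ pone
        have punm : vget sA.2 p.1 p.2 = false := by
          rcases Bool.eq_false_or_eq_true (vget sA.2 p.1 p.2) with ht | hf
          · rw [(hnewmarks p hIn).mpr (Or.inl ht)] at pnew; simp at pnew
          · exact hf
        exact val1 p pone punm
      · intro p hIn hg
        exact val2 p hIn hg
  · -- the cell is skipped by both sides
    have hA : procCell h w sA i j = sA := by
      unfold procCell
      rw [if_pos]
      rcases Bool.eq_false_or_eq_true (vget sA.2 i j) with ht | hf
      · exact Or.inr ht
      · refine Or.inl (fun h1 => hP ⟨val2 (i, j) hijIn h1, hf⟩)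
    have hB : procCellB ones h w sB i j = sB := by
      unfold procCellB
      rw [if_neg (fun hmem => hP ((rem (i, j)).mp hmem))]
    rw [hA, hB]
    exact ⟨geq, good, rect, rem, mko, mkc, val1, val2⟩


-- ---------- folding the invariant through both double loops ----------

theorem foldInnerInv (g0 : List (List Int)) (h w : Nat) (ones : List (Int × Int))
    (honesR : ∀ p ∈ ones, InR h w p) (hond : ones.Nodup) (hlen : ones.length ≤ h * w)
    (i : Nat) (hi : i < h) :
    ∀ (lj : List Nat), (∀ j ∈ lj, j < w) →
    ∀ (sA : List (List Int) × List (List Bool)) (sB : List (List Int) × List (Int × Int)),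
    LoopInv g0 h w ones sA sB →
    LoopInv g0 h w ones
      (lj.foldl (fun st (j : Nat) => procCell h w st (i : Int) (j : Int)) sA)
      (lj.foldl (fun st (j : Nat) => procCellB ones h w st (i : Int) (j : Int)) sB) := by
  intro lj
  induction lj with
  | nil => intro _ sA sB hI; exact hI
  | cons j lj ih =>
    intro hjs sA sB hI
    have hj : j < w := hjs j (by simp)
    rw [List.foldl_cons, List.foldl_cons]
    exact ih (fun j' hj' => hjs j' (by simp [hj'])) _ _
      (stepInv g0 h w ones honesR hond hlen (i : Int) (j : Int)
        ⟨by omega, by omega, by omega, by omega⟩ sA sB hI)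

theorem foldOuterInv (g0 : List (List Int)) (h w : Nat) (ones : List (Int × Int))
    (honesR : ∀ p ∈ ones, InR h w p) (hond : ones.Nodup) (hlen : ones.length ≤ h * w) :
    ∀ (li : List Nat), (∀ i ∈ li, i < h) →
    ∀ (sA : List (List Int) × List (List Bool)) (sB : List (List Int) × List (Int × Int)),
    LoopInv g0 h w ones sA sB →
    LoopInv g0 h w ones
      (li.foldl (fun st (i : Nat) =>
        (List.range w).foldl (fun st (j : Nat) => procCell h w st (i : Int) (j : Int)) st) sA)
      (li.foldl (fun st (i : Nat) =>
        (List.range w).foldl (fun st (j : Nat) => procCellB ones h w st (i : Int) (j : Int)) st) sB) := by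
  intro li
  induction li with
  | nil => intro _ sA sB hI; exact hI
  | cons i li ih =>
    intro his sA sB hI
    have hi : i < h := his i (by simp)
    rw [List.foldl_cons, List.foldl_cons]
    exact ih (fun i' hi' => his i' (by simp [hi'])) _ _
      (foldInnerInv g0 h w ones honesR hond hlen i hi (List.range w)
        (fun j hj => List.mem_range.mp hj) sA sB hI)

-- ===== VERDICT (by name: the statement is the Claim_ definition above) =====
theorem transform_spec : Claim_equal_transform := by
  unfold Claim_equal_transform
  intro grid _ hpre
  unfold Spec_transform
  obtain ⟨hne, hrows⟩ := hpre
  have hempty : grid.isEmpty = false := by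
    cases grid with
    | nil => exact absurd rfl hne
    | cons a l => rfl
  have honesR : ∀ p ∈ onesOf grid grid.length (grid.headD []).length,
      InR grid.length (grid.headD []).length p :=
    fun p hp => ((mem_onesOf grid _ _ p).mp hp).1
  have hond := onesOf_nodup grid grid.length (grid.headD []).length
  have hlen := onesOf_length_le grid grid.length (grid.headD []).length
  have hinit : LoopInv grid grid.length (grid.headD []).length
      (onesOf grid grid.length (grid.headD []).length)
      (grid, List.replicate grid.length (List.replicate (grid.headD []).length false))
      (grid, PySem.Set.ofList (onesOf grid grid.length (grid.headD []).length)) := by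
    refine ⟨rfl, ⟨rfl, ?_⟩, rect_replicate _ _, ?_, ?_, ?_, ?_, ?_⟩
    · intro k hk
      rw [List.getD_eq_getElem _ _ hk]
      exact hrows _ (List.getElem_mem hk)
    · intro p
      rw [PySem.Set.mem_ofList _ _, vget_replicate]
      simp
    · intro p _ hm
      rw [vget_replicate] at hm
      simp at hm
    · intro p _ hm
      rw [vget_replicate] at hm
      simp at hm
    · intro p hp _
      exact ((mem_onesOf grid _ _ p).mp hp).2
    · intro p hIn hg
      exact (mem_onesOf grid _ _ p).mpr ⟨hIn, hg⟩
  have hfin := foldOuterInv grid grid.length (grid.headD []).length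
    (onesOf grid grid.length (grid.headD []).length) honesR hond hlen
    (List.range grid.length) (fun i hi => List.mem_range.mp hi)
    (grid, List.replicate grid.length (List.replicate (grid.headD []).length false))
    (grid, PySem.Set.ofList (onesOf grid grid.length (grid.headD []).length)) hinit
  unfold transform transform_alt
  rw [if_neg (by simp [hempty]), if_neg (by simp [hempty])]
  exact hfin.geq.symm
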